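-- pv_equiv track=rewrite | github.com/iangill1/CT421-Assignment-1 | Exam Timetabling.py | soft_constraints_violations
-- ===== SOURCE A (Python) =====
-- def get_students_slots(student, timetable, E, N):
--     return sorted([timetable[exam] for exam in range(N) if E[student][exam] == 1])
--
-- def soft_constraints_violations(timetable, E, M, N, K):
--     total_penalty = 0
--     for student in range(M):
--         slots = get_students_slots(student, timetable, E, N)
--         if not slots:
--             continue
--
--         # Consecutive slots penalty
--         for i in range(len(slots) - 1):
--             if slots[i + 1] - slots[i] == 1:
--                 total_penalty += 1
--
--         # Long exam gap penalty
--         if len(slots) >= 2: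
--             max_gap = max(slots[i + 1] - slots[i] for i in range(len(slots) - 1))
--             if max_gap > K // 2:
--                 total_penalty += 1
--
--         # End cluster penalty
--         if all(slot >= K - 2 for slot in slots):
--             total_penalty += 1
--
--     return total_penalty
-- ===== SOURCE B (Python) =====
-- def soft_constraints_violations(timetable, E, M, N, K):
--     total = 0
--     half = K // 2
--     for student in range(M):
--         row = E[student]
--         occupied = set()
--         count = 0
--         for exam in range(N):
--             if row[exam] == 1:
--                 occupied.add(timetable[exam])
--                 count += 1
--         if not occupied:
--             continue
--         # consecutive penalty: one per pair of successive distinct slots exactly 1 apart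
--         total += sum(1 for v in occupied if v + 1 in occupied)
--         # long-gap penalty: largest distance between successive distinct occupied slots
--         if count >= 2:
--             mx = max(occupied)
--             gap = 0
--             for v in occupied:
--                 if v != mx:
--                     nxt = min(w for w in occupied if w > v)
--                     if nxt - v > gap:
--                         gap = nxt - v
--             if gap > half:
--                 total += 1
--         # end-cluster penalty: every occupied slot lies in the last three slots
--         if min(occupied) >= K - 2:
--             total += 1
--     return total
-- ===== Notes on version B (the rewrite author's own statement) =====
-- stated objective: alternative
-- what changed: Per student, B replaces A's sort of the slot list and index-scan over adjacent sorted entries by a set of occupied slots plus an exam counter, counting consecutive penalties as slots whose successor slot is occupied, finding the largest gap via min-of-larger-slots queries, and testing the end cluster with min(occupied).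
-- outside the precondition, e.g. on soft_constraints_violations([2, 61, 10, 17], [[], [2, -3, 7]], 7, -3, 4): A returns 0, B raises IndexError
import Mathlib
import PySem

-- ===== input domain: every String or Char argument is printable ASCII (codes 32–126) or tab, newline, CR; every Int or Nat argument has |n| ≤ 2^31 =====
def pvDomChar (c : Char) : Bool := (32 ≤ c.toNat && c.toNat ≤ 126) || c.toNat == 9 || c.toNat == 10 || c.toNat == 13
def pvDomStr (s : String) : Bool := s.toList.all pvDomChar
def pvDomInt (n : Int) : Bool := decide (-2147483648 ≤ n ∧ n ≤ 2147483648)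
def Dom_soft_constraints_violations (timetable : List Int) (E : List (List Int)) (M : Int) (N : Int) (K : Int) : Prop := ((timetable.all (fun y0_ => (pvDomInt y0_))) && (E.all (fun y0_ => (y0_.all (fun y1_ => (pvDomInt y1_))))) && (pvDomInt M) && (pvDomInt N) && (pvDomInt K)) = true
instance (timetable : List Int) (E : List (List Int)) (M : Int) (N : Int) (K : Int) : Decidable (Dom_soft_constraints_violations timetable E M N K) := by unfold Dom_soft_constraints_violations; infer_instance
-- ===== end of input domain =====

-- B replaces A's per-student sort-then-scan by a set of occupied slots queried for successors
-- (v+1 membership, min-of-larger for gaps, min for the end cluster): an alternative decomposition, not claimed faster.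

-- ===== PORT A =====
def get_students_slots (student : Int) (timetable : List Int) (E : List (List Int)) (N : Int) : List Int :=
  PySem.List.sorted
    ((PySem.List.pyRange 0 N 1).foldl (fun acc exam =>
      if PySem.List.pyGetD (PySem.List.pyGetD E student []) exam 0 = 1 then
        acc ++ [PySem.List.pyGetD timetable exam 0]
      else acc) [])
    (fun x => x) false

def soft_constraints_violations (timetable : List Int) (E : List (List Int)) (M : Int) (N : Int) (K : Int) : Int :=
  (PySem.List.pyRange 0 M 1).foldl (fun total_penalty student =>
    let slots := get_students_slots student timetable E N
    if slots = [] then total_penalty else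
      let tp1 := (PySem.List.pyRange 0 (PySem.List.len slots - 1) 1).foldl
        (fun tp i =>
          if PySem.List.pyGetD slots (i + 1) 0 - PySem.List.pyGetD slots i 0 = 1 then tp + 1 else tp)
        total_penalty
      let tp2 :=
        if 2 ≤ PySem.List.len slots then
          match PySem.List.max?
              ((PySem.List.pyRange 0 (PySem.List.len slots - 1) 1).map
                (fun i => PySem.List.pyGetD slots (i + 1) 0 - PySem.List.pyGetD slots i 0))
              (fun x => x) with
          | some max_gap => if PySem.Int.floordiv K 2 < max_gap then tp1 + 1 else tp1
          | none => tp1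
        else tp1
      if slots.all (fun slot => decide (K - 2 ≤ slot)) then tp2 + 1 else tp2) 0

-- ===== PORT B =====
def soft_constraints_violations_alt (timetable : List Int) (E : List (List Int)) (M : Int) (N : Int) (K : Int) : Int :=
  let half := PySem.Int.floordiv K 2
  (PySem.List.pyRange 0 M 1).foldl (fun total student =>
    let row := PySem.List.pyGetD E student []
    let sc := (PySem.List.pyRange 0 N 1).foldl
      (fun (sc : PySem.Set Int × Int) exam =>
        if PySem.List.pyGetD row exam 0 = 1 then
          (PySem.Set.add sc.1 (PySem.List.pyGetD timetable exam 0), sc.2 + 1)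
        else sc)
      (PySem.Set.empty, 0)
    let occupied := sc.1
    let count := sc.2
    if occupied = [] then total else
      let t1 := total + ((occupied.countP (fun v => PySem.Set.contains occupied (v + 1)) : Nat) : Int)
      let t2 :=
        if 2 ≤ count then
          match PySem.List.max? occupied (fun x => x) with
          | some mx =>
            let gap := occupied.foldl
              (fun gap v =>
                if v ≠ mx then
                  match PySem.List.min? (occupied.filter (fun w => decide (v < w))) (fun x => x) with
                  | some nxt => if gap < nxt - v then nxt - v else gap
                  | none => gap
                else gap) 0
            if half < gap then t1 + 1 else t1
          | none => t1
        else t1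
      match PySem.List.min? occupied (fun x => x) with
      | some mn => if K - 2 ≤ mn then t2 + 1 else t2
      | none => t2) 0

-- ===== PRECONDITION & SPEC =====
-- Pre_ excludes the inputs where Python A raises an IndexError (M exceeding len(E), a row of E
-- shorter than N, or an exam whose E-entry is 1 pointing past the end of timetable); when N <= 0
-- and M > len(E), A returns 0 without ever touching E, while B's eager row lookup raises, so those
-- inputs are excluded too.
def Pre_soft_constraints_violations (timetable : List Int) (E : List (List Int)) (M : Int) (N : Int) (K : Int) : Prop :=
  M ≤ (E.length : Int) ∧
  ∀ row ∈ E.take M.toNat, N ≤ (row.length : Int) ∧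
    ∀ e ∈ List.range N.toNat, row.getD e 0 = 1 → e < timetable.length

instance (timetable : List Int) (E : List (List Int)) (M : Int) (N : Int) (K : Int) : Decidable (Pre_soft_constraints_violations timetable E M N K) := by unfold Pre_soft_constraints_violations; infer_instance

def pvWitness_soft_constraints_violations : List Int × List (List Int) × Int × Int × Int :=
  ([0, 1, 3], [[1, 1, 0], [0, 0, 1]], 2, 3, 5)

def Spec_soft_constraints_violations (timetable : List Int) (E : List (List Int)) (M : Int) (N : Int) (K : Int) (out : Int) : Prop := out = soft_constraints_violations_alt timetable E M N K
instance (timetable : List Int) (E : List (List Int)) (M : Int) (N : Int) (K : Int) (out : Int) : Decidable (Spec_soft_constraints_violations timetable E M N K out) := by unfold Spec_soft_constraints_violations; infer_instance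

-- ===== CLAIM (what is proved, stated in full; the proofs are below) =====
def Claim_equal_soft_constraints_violations : Prop := ∀ (timetable : List Int) (E : List (List Int)) (M : Int) (N : Int) (K : Int), Dom_soft_constraints_violations timetable E M N K → Pre_soft_constraints_violations timetable E M N K → Spec_soft_constraints_violations timetable E M N K (soft_constraints_violations timetable E M N K)

-- ===== LEMMAS AND PROOFS =====


-- indices 0..len-2 of s, paired up, are exactly the adjacent pairs (pure List.range form)
lemma pv_range_zip (a : Int) (t : List Int) :
    (List.range t.length).map (fun k => ((a :: t).getD k 0, (a :: t).getD (k + 1) 0)) = (a :: t).zip t := by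
  induction t generalizing a with
  | nil => simp
  | cons b t' ih =>
      simp only [List.length_cons]
      rw [List.range_succ_eq_map]
      simp only [List.map_cons, List.map_map, List.zip_cons_cons]
      refine congrArg₂ _ ?_ ?_
      · simp [List.getD]
      · rw [← ih b]
        refine List.map_congr_left ?_
        intro k _
        simp [Function.comp, Nat.succ_eq_add_one]

-- A's index loop visits exactly the adjacent pairs of slots
lemma pv_adjPairs (s : List Int) :
    (PySem.List.pyRange 0 (PySem.List.len s - 1) 1).map
      (fun i => (PySem.List.pyGetD s i 0, PySem.List.pyGetD s (i + 1) 0)) = s.zip s.tail := by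
  cases s with
  | nil =>
      rw [PySem.List.pyRange_one_eq_nil (by simp [PySem.List.len_eq])]
      simp
  | cons a t =>
      rw [PySem.List.len_eq, PySem.List.pyRange_one]
      simp only [List.map_map]
      have h1 : ((((a :: t).length : Int)) - 1 - 0).toNat = t.length := by
        simp
      rw [h1, show (a :: t).tail = t from rfl, ← pv_range_zip a t]
      refine List.map_congr_left ?_
      intro k _
      have h2 : (0 : Int) + (k : Int) = ((k : Nat) : Int) := by omega
      have e1 : PySem.List.pyGetD (a :: t) ((k : Nat) : Int) 0 = (a :: t).getD k 0 :=
        PySem.List.pyGetD_natCast _ _ _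
      have e2 : PySem.List.pyGetD (a :: t) (((k : Nat) : Int) + 1) 0 = (a :: t).getD (k + 1) 0 := by
        rw [show (((k : Nat) : Int) + 1) = (((k + 1 : Nat)) : Int) from by omega]
        exact PySem.List.pyGetD_natCast _ _ _
      simp only [Function.comp, h2, e1, e2]

-- core: adjacent sorted pairs at distance 1 = distinct values whose successor occurs
lemma pv_consec (s : List Int) (hs : s.Pairwise (· ≤ ·)) :
    List.countP (fun p => decide (p.2 - p.1 = 1)) (s.zip s.tail)
      = List.countP (fun v => decide ((v + 1) ∈ s)) s.dedup := by
  induction s with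
  | nil => simp
  | cons a t ih =>
      cases t with
      | nil => simp
      | cons b t' =>
          have hab : a ≤ b := (List.pairwise_cons.mp hs).1 b (by simp)
          have htl : (b :: t').Pairwise (· ≤ ·) := (List.pairwise_cons.mp hs).2
          have hble : ∀ x ∈ b :: t', b ≤ x := by
            intro x hx
            rcases List.mem_cons.mp hx with h | h
            · omega
            · exact (List.pairwise_cons.mp htl).1 x h
          simp only [List.tail_cons]
          rw [List.zip_cons_cons, List.countP_cons]
          have ih' := ih htl
          simp only [List.tail_cons] at ih'
          rw [ih']
          by_cases heq : a = b
          · subst heq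
            rw [show (a :: a :: t').dedup = (a :: t').dedup from List.dedup_cons_of_mem (by simp)]
            have hpr : (fun v => decide ((v + 1) ∈ a :: a :: t')) = (fun v => decide ((v + 1) ∈ a :: t')) := by
              funext v; simp
            simp only [hpr]
            simp
          · have halt : a < b := lt_of_le_of_ne hab heq
            have hnotmem : a ∉ b :: t' := fun h => absurd (hble a h) (by omega)
            rw [List.dedup_cons_of_notMem hnotmem, List.countP_cons]
            have hcong : List.countP (fun v => decide ((v + 1) ∈ a :: b :: t')) (b :: t').dedup
                = List.countP (fun v => decide ((v + 1) ∈ b :: t')) (b :: t').dedup := by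
              refine List.countP_congr ?_
              intro v hv
              have hvmem : v ∈ b :: t' := List.mem_dedup.mp hv
              have hbv : b ≤ v := hble v hvmem
              simp only [decide_eq_true_eq, List.mem_cons]
              constructor
              · rintro (h | h | h)
                · omega
                · exact Or.inl h
                · exact Or.inr h
              · rintro (h | h)
                · exact Or.inr (Or.inl h)
                · exact Or.inr (Or.inr h)
            rw [hcong]
            have hhead : (decide ((a + 1) ∈ a :: b :: t')) = (decide (b - a = 1)) := by
              simp only [decide_eq_decide, List.mem_cons]
              constructor
              · rintro (h | h | h)
                · omega
                · omega
                · have := hble _ (List.mem_cons_of_mem b h)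
                  omega
              · intro h
                exact Or.inr (Or.inl (by omega))
            rw [hhead]

-- any adjacent pair of a sorted list separates the list
lemma pv_adj_bound (s : List Int) (hs : s.Pairwise (· ≤ ·)) :
    ∀ p ∈ s.zip s.tail, p.1 ≤ p.2 ∧ ∀ x ∈ s, x ≤ p.1 ∨ p.2 ≤ x := by
  induction s with
  | nil => simp
  | cons a t ih =>
      cases t with
      | nil => simp
      | cons b t' =>
          have hab : a ≤ b := (List.pairwise_cons.mp hs).1 b (by simp)
          have htl : (b :: t').Pairwise (· ≤ ·) := (List.pairwise_cons.mp hs).2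
          have hble : ∀ x ∈ b :: t', b ≤ x := by
            intro x hx
            rcases List.mem_cons.mp hx with h | h
            · omega
            · exact (List.pairwise_cons.mp htl).1 x h
          simp only [List.tail_cons, List.zip_cons_cons]
          intro p hp
          rcases List.mem_cons.mp hp with h | h
          · subst h
            refine ⟨hab, ?_⟩
            intro x hx
            rcases List.mem_cons.mp hx with h | h
            · omega
            · exact Or.inr (hble x h)
          · have ih' := ih htl
            simp only [List.tail_cons] at ih'
            obtain ⟨h1, h2⟩ := ih' p h
            refine ⟨h1, ?_⟩
            intro x hx
            rcases List.mem_cons.mp hx with hxa | hxm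
            · subst hxa
              have hp1 : p.1 ∈ b :: t' := (List.of_mem_zip h).1
              exact Or.inl (le_trans hab (hble _ hp1))
            · exact h2 x hxm

-- a value with something larger in a sorted list starts a climbing adjacent pair
lemma pv_adj_exists (s : List Int) (hs : s.Pairwise (· ≤ ·)) :
    ∀ v ∈ s, ∀ w ∈ s, v < w → ∃ b, (v, b) ∈ s.zip s.tail ∧ v < b := by
  induction s with
  | nil => simp
  | cons a t ih =>
      cases t with
      | nil =>
          intro v hv w hw hvw
          simp only [List.mem_singleton] at hv hw
          omega
      | cons b t' =>
          have hab : a ≤ b := (List.pairwise_cons.mp hs).1 b (by simp)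
          have htl : (b :: t').Pairwise (· ≤ ·) := (List.pairwise_cons.mp hs).2
          have hale : ∀ x ∈ b :: t', a ≤ x := (List.pairwise_cons.mp hs).1
          intro v hv w hw hvw
          have lift : ∀ q ∈ (b :: t').zip t', q ∈ (a :: b :: t').zip (b :: t') := by
            intro q hq
            simp only [List.zip_cons_cons]
            exact List.mem_cons_of_mem _ hq
          rcases List.mem_cons.mp hv with hva | hvt
      
          · subst hva
            by_cases hvb : v < b
            · exact ⟨b, by simp [List.zip_cons_cons], hvb⟩
            · have hvb' : b = v := by omega
              subst hvb'
              have hwt : w ∈ b :: t' := by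
                rcases List.mem_cons.mp hw with h | h
                · omega
                · exact h
              obtain ⟨c, hc1, hc2⟩ := ih htl b (by simp) w hwt hvw
              simp only [List.tail_cons] at hc1
              exact ⟨c, lift _ hc1, hc2⟩
          · have hwt : w ∈ b :: t' := by
              rcases List.mem_cons.mp hw with h | h
              · exfalso; have := hale v hvt; omega
              · exact h
            obtain ⟨c, hc1, hc2⟩ := ih htl v hvt w hwt hvw
            simp only [List.tail_cons] at hc1
            exact ⟨c, lift _ hc1, hc2⟩

-- characterisation of B's running-max gap loop
lemma pv_gapFold (occ : List Int) (mx h : Int) : ∀ (l : List Int) (a : Int),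
    (h < l.foldl
      (fun gap v =>
        if v ≠ mx then
          match PySem.List.min? (occ.filter (fun w => decide (v < w))) (fun x => x) with
          | some nxt => if gap < nxt - v then nxt - v else gap
          | none => gap
        else gap) a)
    ↔ (h < a ∨ ∃ v ∈ l, v ≠ mx ∧ ∃ nxt,
        PySem.List.min? (occ.filter (fun w => decide (v < w))) (fun x => x) = some nxt ∧ h < nxt - v) := by
  intro l
  induction l with
  | nil => simp
  | cons v l ihl =>
      intro a
      rw [List.foldl_cons]
      by_cases hv : v = mx
      · rw [if_neg (by simp [hv]), ihl]
        constructor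
        · rintro (ha | ⟨v', hm, hp⟩)
          · exact Or.inl ha
          · exact Or.inr ⟨v', List.mem_cons_of_mem _ hm, hp⟩
        · rintro (ha | ⟨v', hm, hp⟩)
          · exact Or.inl ha
          · rcases List.mem_cons.mp hm with rfl | hm'
            · exact absurd hv hp.1
            · exact Or.inr ⟨v', hm', hp⟩
      · rw [if_pos hv]
        cases hmin : PySem.List.min? (occ.filter (fun w => decide (v < w))) (fun x => x) with
        | none =>
            rw [ihl]
            constructor
            · rintro (ha | ⟨v', hm, hp⟩)
              · exact Or.inl ha
              · exact Or.inr ⟨v', List.mem_cons_of_mem _ hm, hp⟩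
            · rintro (ha | ⟨v', hm, hp⟩)
              · exact Or.inl ha
              · rcases List.mem_cons.mp hm with rfl | hm'
                · obtain ⟨_, nxt, hcx, _⟩ := hp
                  rw [hmin] at hcx
                  cases hcx
                · exact Or.inr ⟨v', hm', hp⟩
        | some nxt =>
            rw [ihl]
            constructor
            · rintro (hlt | ⟨v', hm, hp⟩)
              · have hlt' : h < if a < nxt - v then nxt - v else a := hlt
                by_cases hc : a < nxt - v
                · rw [if_pos hc] at hlt'
                  exact Or.inr ⟨v, List.mem_cons_self, hv, nxt, hmin, hlt'⟩
                · rw [if_neg hc] at hlt'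
                  exact Or.inl hlt'
              · exact Or.inr ⟨v', List.mem_cons_of_mem _ hm, hp⟩
            · rintro (ha | ⟨v', hm, hp⟩)
              · exact Or.inl (show h < if a < nxt - v then nxt - v else a from by split_ifs <;> omega)
              · rcases List.mem_cons.mp hm with hveq | hm'
                · rw [hveq] at hp
                  obtain ⟨_, nxt', hcx, hlt⟩ := hp
                  rw [hmin] at hcx
                  injection hcx with hval
                  subst hval
                  exact Or.inl (show h < if a < nxt - v then nxt - v else a from by split_ifs <;> omega)
                · exact Or.inr ⟨v', hm', hp⟩

-- the per-student penalty from the sorted slot list equals the one from the slot set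
lemma pv_perStudent (vs : List Int) (K total : Int) :
    (if PySem.List.sorted vs (fun x => x) false = [] then total else
      let slots := PySem.List.sorted vs (fun x => x) false
      let tp1 := (PySem.List.pyRange 0 (PySem.List.len slots - 1) 1).foldl
        (fun tp i =>
          if PySem.List.pyGetD slots (i + 1) 0 - PySem.List.pyGetD slots i 0 = 1 then tp + 1 else tp)
        total
      let tp2 :=
        if 2 ≤ PySem.List.len slots then
          match PySem.List.max?
              ((PySem.List.pyRange 0 (PySem.List.len slots - 1) 1).map
                (fun i => PySem.List.pyGetD slots (i + 1) 0 - PySem.List.pyGetD slots i 0))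
              (fun x => x) with
          | some max_gap => if PySem.Int.floordiv K 2 < max_gap then tp1 + 1 else tp1
          | none => tp1
        else tp1
      if slots.all (fun slot => decide (K - 2 ≤ slot)) then tp2 + 1 else tp2)
    = (if PySem.Set.ofList vs = ([] : List Int) then total else
      let occupied : PySem.Set Int := PySem.Set.ofList vs
      let t1 := total + ((occupied.countP (fun v => PySem.Set.contains occupied (v + 1)) : Nat) : Int)
      let t2 :=
        if 2 ≤ (vs.length : Int) then
          match PySem.List.max? occupied (fun x => x) with
          | some mx =>
            let gap := occupied.foldl
              (fun gap v =>
                if v ≠ mx then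
                  match PySem.List.min? (occupied.filter (fun w => decide (v < w))) (fun x => x) with
                  | some nxt => if gap < nxt - v then nxt - v else gap
                  | none => gap
                else gap) 0
            if PySem.Int.floordiv K 2 < gap then t1 + 1 else t1
          | none => t1
        else t1
      match PySem.List.min? occupied (fun x => x) with
      | some mn => if K - 2 ≤ mn then t2 + 1 else t2
      | none => t2) := by
  by_cases hvs : vs = []
  · subst hvs
    simp [PySem.List.sorted]
  · have hs_ne : PySem.List.sorted vs (fun x => x) false ≠ [] := by
      rw [Ne, PySem.List.sorted_eq_nil_iff]; exact hvs
    have hT_ne : PySem.Set.ofList vs ≠ ([] : List Int) := by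
      obtain ⟨x, t, rfl⟩ := List.exists_cons_of_ne_nil hvs
      intro h
      have : x ∈ PySem.Set.ofList (x :: t) := (PySem.Set.mem_ofList _ _).mpr (by simp)
      rw [h] at this
      exact (List.not_mem_nil) this
    rw [if_neg hs_ne, if_neg hT_ne]
    set s := PySem.List.sorted vs (fun x => x) false with hs_def
    set T : List Int := PySem.Set.ofList vs with hT_def
    have hperm : s.Perm vs := PySem.List.sorted_perm vs _ false
    have hmem_s : ∀ x : Int, x ∈ s ↔ x ∈ vs := fun x => hperm.mem_iff
    have hTs : ∀ x : Int, x ∈ T ↔ x ∈ s := fun x => by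
      rw [hT_def, PySem.Set.mem_ofList, hmem_s]
    have hsort : s.Pairwise (· ≤ ·) := PySem.List.sorted_pairwise vs (fun x => x)
    have hlen : s.length = vs.length := hperm.length_eq
    have hnodupT : T.Nodup := PySem.Set.nodup_ofList vs
    have hlenI : PySem.List.len s = (vs.length : Int) := by
      rw [PySem.List.len_eq, hlen]
    obtain ⟨mn, hmn⟩ : ∃ mn, PySem.List.min? T (fun x => x) = some mn := by
      cases h : PySem.List.min? T (fun x => x) with
      | none => exact absurd ((PySem.List.min?_eq_none_iff _ _).mp h) hT_ne
      | some mn => exact ⟨mn, rfl⟩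
    obtain ⟨mx, hmx⟩ : ∃ mx, PySem.List.max? T (fun x => x) = some mx := by
      cases h : PySem.List.max? T (fun x => x) with
      | none => exact absurd ((PySem.List.max?_eq_none_iff _ _).mp h) hT_ne
      | some mx => exact ⟨mx, rfl⟩
    have hcnt : List.countP (fun i => decide (PySem.List.pyGetD s (i + 1) 0 - PySem.List.pyGetD s i 0 = 1)) (PySem.List.pyRange 0 (PySem.List.len s - 1) 1)
        = T.countP (fun v => PySem.Set.contains T (v + 1)) := by
      have h1 : List.countP (fun p : Int × Int => decide (p.2 - p.1 = 1)) (s.zip s.tail)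
          = List.countP (fun i => decide (PySem.List.pyGetD s (i + 1) 0 - PySem.List.pyGetD s i 0 = 1)) (PySem.List.pyRange 0 (PySem.List.len s - 1) 1) := by
        rw [← pv_adjPairs s, List.countP_map]
        rfl
      have hpermTD : T.Perm s.dedup :=
        (List.perm_ext_iff_of_nodup hnodupT s.nodup_dedup).mpr (fun a => by rw [hTs a, List.mem_dedup])
      have h2 : T.countP (fun v => PySem.Set.contains T (v + 1))
          = T.countP (fun v => decide ((v + 1) ∈ s)) := by
        refine List.countP_congr ?_
        intro v _
        simp [PySem.Set.contains, hTs]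
      rw [h2, hpermTD.countP_eq, ← pv_consec s hsort, h1]
    simp only []
    rw [PySem.List.foldl_ite_add_one, hcnt, hlenI]
    simp only [hmn, hmx]
    have hall : ((s.all fun slot => decide (K - 2 ≤ slot)) = true) ↔ (K - 2 ≤ mn) := by
      rw [List.all_eq_true]
      constructor
      · intro h
        simpa using h mn ((hTs mn).mp (PySem.List.min?_mem hmn))
      · intro h x hx
        have hmnx : mn ≤ x := PySem.List.min?_isMin hmn x ((hTs x).mpr hx)
        simp only [decide_eq_true_eq]
        omega
    by_cases hc2 : 2 ≤ (vs.length : Int)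
    · have hslen2 : 2 ≤ s.length := by
        have : (2 : Int) ≤ (s.length : Int) := by rw [hlen]; exact hc2
        exact_mod_cast this
      have hzip_ne : s.zip s.tail ≠ [] := by
        refine List.ne_nil_of_length_pos ?_
        rw [List.length_zip, List.length_tail]
        omega
      have hdiffs : List.map (fun i => PySem.List.pyGetD s (i + 1) 0 - PySem.List.pyGetD s i 0)
            (PySem.List.pyRange 0 ((vs.length : Int) - 1))
          = (s.zip s.tail).map (fun p => p.2 - p.1) := by
        rw [← hlenI, ← pv_adjPairs s, List.map_map]
        rfl
      obtain ⟨mg, hmg⟩ : ∃ mg, PySem.List.max?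
          (List.map (fun i => PySem.List.pyGetD s (i + 1) 0 - PySem.List.pyGetD s i 0)
            (PySem.List.pyRange 0 ((vs.length : Int) - 1))) (fun x => x) = some mg := by
        cases h : PySem.List.max?
            (List.map (fun i => PySem.List.pyGetD s (i + 1) 0 - PySem.List.pyGetD s i 0)
              (PySem.List.pyRange 0 ((vs.length : Int) - 1))) (fun x => x) with
        | none =>
            exfalso
            have := (PySem.List.max?_eq_none_iff _ _).mp h
            rw [hdiffs] at this
            exact hzip_ne (List.map_eq_nil_iff.mp this)
        | some mg => exact ⟨mg, rfl⟩
      simp only [hmg]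
      have hbridge : (∃ p ∈ s.zip s.tail, PySem.Int.floordiv K 2 < p.2 - p.1) ↔
          (PySem.Int.floordiv K 2 < 0 ∨ ∃ v ∈ T, v ≠ mx ∧ ∃ nxt,
            PySem.List.min? (List.filter (fun w => decide (v < w)) T) (fun x => x) = some nxt ∧
              PySem.Int.floordiv K 2 < nxt - v) := by
        constructor
        · rintro ⟨p, hp, hlt⟩
          obtain ⟨h12, hsep⟩ := pv_adj_bound s hsort p hp
          by_cases hhalf : PySem.Int.floordiv K 2 < 0
          · exact Or.inl hhalf
          · have hplt : p.1 < p.2 := by omega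
            have hp2s : p.2 ∈ s := List.mem_of_mem_tail (List.of_mem_zip hp).2
            have hp2T : p.2 ∈ T := (hTs p.2).mpr hp2s
            have hp2f : p.2 ∈ List.filter (fun w => decide (p.1 < w)) T := by
              rw [List.mem_filter]
              exact ⟨hp2T, by simpa using hplt⟩
            obtain ⟨nxt, hnxt⟩ : ∃ nxt, PySem.List.min?
                (List.filter (fun w => decide (p.1 < w)) T) (fun x => x) = some nxt := by
              cases h : PySem.List.min? (List.filter (fun w => decide (p.1 < w)) T) (fun x => x) with
              | none =>
                  exfalso
                  have := (PySem.List.min?_eq_none_iff _ _).mp h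
                  rw [this] at hp2f
                  exact (List.not_mem_nil) hp2f
              | some nxt => exact ⟨nxt, rfl⟩
            have hmxbound : p.2 ≤ mx := PySem.List.max?_isMax hmx p.2 hp2T
            refine Or.inr ⟨p.1, (hTs p.1).mpr (List.of_mem_zip hp).1, by intro he; omega, nxt, hnxt, ?_⟩
            have hnm := PySem.List.min?_mem hnxt
            have hnT : nxt ∈ T := (List.mem_filter.mp hnm).1
            have hlt1 : p.1 < nxt := by simpa using (List.mem_filter.mp hnm).2
            rcases hsep nxt ((hTs nxt).mp hnT) with h | h
            · omega
            · omega
        · rintro (hhalf | ⟨v, hvT, hvmx, nxt, hnxt, hlt⟩)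
          · obtain ⟨p, hp⟩ := List.exists_mem_of_ne_nil _ hzip_ne
            exact ⟨p, hp, by have := (pv_adj_bound s hsort p hp).1; omega⟩
          · have hvs' : v ∈ s := (hTs v).mp hvT
            have hmxs : mx ∈ s := (hTs mx).mp (PySem.List.max?_mem hmx)
            have hvmx' : v < mx := lt_of_le_of_ne (PySem.List.max?_isMax hmx v hvT) hvmx
            obtain ⟨b, hb, hvb⟩ := pv_adj_exists s hsort v hvs' mx hmxs hvmx'
            have hbT : b ∈ T := (hTs b).mpr (List.mem_of_mem_tail (List.of_mem_zip hb).2)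
            have hbf : b ∈ List.filter (fun w => decide (v < w)) T := by
              rw [List.mem_filter]
              exact ⟨hbT, by simpa using hvb⟩
            have hnb : nxt ≤ b := PySem.List.min?_isMin hnxt b hbf
            exact ⟨(v, b), hb, by simp only []; omega⟩
      have hgap : (PySem.Int.floordiv K 2 < mg) ↔ (PySem.Int.floordiv K 2 <
          List.foldl
            (fun gap v =>
              if v ≠ mx then
                match PySem.List.min? (List.filter (fun w => decide (v < w)) T) fun x => x with
                | some nxt => if gap < nxt - v then nxt - v else gap
                | none => gap
              else gap)
            0 T) := by
        rw [pv_gapFold]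
        rw [← hbridge]
        constructor
        · intro h
          have hm := PySem.List.max?_mem hmg
          rw [hdiffs] at hm
          obtain ⟨p, hp, hpe⟩ := List.mem_map.mp hm
          exact ⟨p, hp, by omega⟩
        · rintro ⟨p, hp, hlt⟩
          have hpd : p.2 - p.1 ∈ List.map (fun i => PySem.List.pyGetD s (i + 1) 0 - PySem.List.pyGetD s i 0)
              (PySem.List.pyRange 0 ((vs.length : Int) - 1)) := by
            rw [hdiffs]
            exact List.mem_map_of_mem hp
          have := PySem.List.max?_isMax hmg _ hpd
          simp only [] at this
          omega
      rw [if_congr hgap rfl rfl, if_congr hall rfl rfl]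
    · simp only [if_neg hc2]
      rw [if_congr hall rfl rfl]


-- ===== VERDICT (by name: the statement is the Claim_ definition above) =====
theorem soft_constraints_violations_spec : Claim_equal_soft_constraints_violations := by
  intro timetable E M N K hDom hPre
  unfold Spec_soft_constraints_violations
  unfold soft_constraints_violations soft_constraints_violations_alt get_students_slots
  simp only []
  apply PySem.List.foldl_congr_mem
  intro total student _
  rw [PySem.List.foldl_append_ite]
  simp only [List.nil_append]
  have hpair : (fun (sc : PySem.Set Int × Int) exam =>
        if PySem.List.pyGetD (PySem.List.pyGetD E student []) exam 0 = 1 then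
          (PySem.Set.add sc.1 (PySem.List.pyGetD timetable exam 0), sc.2 + 1)
        else sc)
      = (fun (sc : PySem.Set Int × Int) exam =>
        ((fun (s1 : PySem.Set Int) e =>
            if PySem.List.pyGetD (PySem.List.pyGetD E student []) e 0 = 1 then
              PySem.Set.add s1 (PySem.List.pyGetD timetable e 0)
            else s1) sc.1 exam,
         (fun (c : Int) e =>
            if PySem.List.pyGetD (PySem.List.pyGetD E student []) e 0 = 1 then c + 1 else c) sc.2 exam)) := by
    funext sc exam
    by_cases h : PySem.List.pyGetD (PySem.List.pyGetD E student []) exam 0 = 1 <;> simp [h]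
  rw [hpair]
  simp only [PySem.Set.empty]
  rw [PySem.List.foldl_prod_mk
        (f := fun (s1 : PySem.Set Int) e =>
          if PySem.List.pyGetD (PySem.List.pyGetD E student []) e 0 = 1 then
            PySem.Set.add s1 (PySem.List.pyGetD timetable e 0)
          else s1)
        (g := fun (c : Int) e =>
          if PySem.List.pyGetD (PySem.List.pyGetD E student []) e 0 = 1 then c + 1 else c)]
  rw [PySem.List.foldl_ite_eq_foldl_filter, ← List.foldl_map, ← PySem.Set.ofList_eq_foldl]
  rw [PySem.List.foldl_ite_add_one]
  have hcount : (0 : Int) + (List.countP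
        (fun e => decide (PySem.List.pyGetD (PySem.List.pyGetD E student []) e 0 = 1))
        (PySem.List.pyRange 0 N 1) : Nat)
      = (((List.filter (fun e => decide (PySem.List.pyGetD (PySem.List.pyGetD E student []) e 0 = 1))
            (PySem.List.pyRange 0 N 1)).map (fun e => PySem.List.pyGetD timetable e 0)).length : Int) := by
    rw [List.length_map, ← List.countP_eq_length_filter]
    omega
  rw [hcount]
  exact pv_perStudent _ K total
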